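-- pv_equiv track=rewrite | github.com/Taikiy49/ICS-33 | Final Review/week5.py | take_count
-- ===== SOURCE A (Python) =====
-- def take_count(count):
--     values = [x * x for x in range(100)]
--     i = iter(values)
--     for _ in range(count):
--         try:
--             yield next(i)
--         except StopIteration: # this is how we would peacefully handle a situation where the count is
--                               # greater than the amount yielded.
--             break
-- ===== SOURCE B (Python) =====
-- def take_count(count):
--     n = min(count, 100)
--     x = 0
--     s = 0
--     while x < n:
--         yield s
--         s += 2 * x + 1
--         x += 1
-- ===== Notes on version B (the rewrite author's own statement) =====
-- stated objective: simpler
-- what changed: Replaces the eager 100-element precomputed list, explicit iterator and StopIteration guard with a direct min(count,100)-bounded loop that maintains the running square incrementally (s += 2*x+1), so no list, no iterator protocol and no multiplication.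
import Mathlib
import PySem

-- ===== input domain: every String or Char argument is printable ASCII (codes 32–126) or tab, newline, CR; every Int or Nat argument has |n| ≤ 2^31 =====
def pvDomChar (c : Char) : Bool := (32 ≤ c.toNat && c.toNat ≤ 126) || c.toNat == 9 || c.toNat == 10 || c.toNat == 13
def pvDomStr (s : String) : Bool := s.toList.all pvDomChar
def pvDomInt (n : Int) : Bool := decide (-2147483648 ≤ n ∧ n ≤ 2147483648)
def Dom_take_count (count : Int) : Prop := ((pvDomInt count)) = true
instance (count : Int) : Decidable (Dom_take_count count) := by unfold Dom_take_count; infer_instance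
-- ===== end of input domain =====

-- B replaces A's eager 100-element list + iterator + StopIteration guard with a direct
-- min(count,100)-bounded loop maintaining the running square incrementally (simpler).


-- ===== PORT A =====
-- the 'for _ in range(count): try yield next(i) except StopIteration: break' loop:
-- walks the iterator's remaining elements with the number of loop iterations still to run,
-- breaking when the iterator is exhausted (range(count) is lazy in Python, so it is a counter here)
def takeCountLoopA : List Int → Int → List Int
  | [], _ => []                        -- next(i) raises StopIteration → break
  | v :: vs, n => if n ≤ 0 then [] else v :: takeCountLoopA vs (n - 1)

def take_count (count : Int) : List Int :=
  let values := (PySem.List.pyRange 0 100 1).map (fun x => x * x)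
  takeCountLoopA values count

-- ===== PORT B =====
-- the 'while x < n: yield s; s += 2*x+1; x += 1' loop, with fuel n - x counted down as a Nat
def takeCountLoopB : Nat → Int → Int → List Int
  | 0, _, _ => []
  | n + 1, x, s => s :: takeCountLoopB n (x + 1) (s + 2 * x + 1)

def take_count_alt (count : Int) : List Int :=
  let n := min count 100
  takeCountLoopB (n - 0).toNat 0 0

-- ===== PRECONDITION & SPEC =====
def Spec_take_count (count : Int) (out : List Int) : Prop := out = take_count_alt count
instance (count : Int) (out : List Int) : Decidable (Spec_take_count count out) := by unfold Spec_take_count; infer_instance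

-- ===== CLAIM (what is proved, stated in full; the proofs are below) =====
def Claim_equal_take_count : Prop := ∀ (count : Int), Dom_take_count count → Spec_take_count count (take_count count)

-- ===== LEMMAS AND PROOFS =====

theorem takeCountLoopA_eq_take (it : List Int) (n : Int) :
    takeCountLoopA it n = it.take n.toNat := by
  induction it generalizing n with
  | nil => simp [takeCountLoopA]
  | cons v vs ih =>
    by_cases h : n ≤ 0
    · have : n.toNat = 0 := by omega
      simp [takeCountLoopA, h, this]
    · have h1 : n.toNat = (n - 1).toNat + 1 := by omega
      simp only [takeCountLoopA, if_neg h, ih, h1, List.take_succ_cons]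

theorem takeCountLoopB_sq (n : Nat) (x : Int) :
    takeCountLoopB n x (x * x) = (List.range n).map (fun (k : Nat) => (x + (k : Int)) * (x + (k : Int))) := by
  induction n generalizing x with
  | zero => simp [takeCountLoopB]
  | succ m ih =>
    have h : x * x + 2 * x + 1 = (x + 1) * (x + 1) := by ring
    rw [List.range_succ_eq_map]
    simp only [takeCountLoopB, h, ih (x + 1), List.map_cons, List.map_map]
    refine List.cons_eq_cons.mpr ⟨by push_cast; ring, ?_⟩
    apply List.map_congr_left
    intro i _
    simp only [Function.comp]
    push_cast
    ring

-- ===== VERDICT (by name: the statement is the Claim_ definition above) =====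
theorem take_count_spec : Claim_equal_take_count := by
  intro count _
  unfold Spec_take_count take_count take_count_alt
  simp only [PySem.List.pyRange_one]
  rw [takeCountLoopA_eq_take]
  
  have h0 : takeCountLoopB (min count 100 - 0).toNat 0 0 =
      (List.range (min count 100 - 0).toNat).map (fun (k : Nat) => ((k : Int)) * (k : Int)) := by
    have := takeCountLoopB_sq (min count 100 - 0).toNat 0
    simpa using this
  rw [h0, List.map_map, ← List.map_take, List.take_range]
  have hm : min count.toNat ((100 - 0 : Int)).toNat = (min count 100 - 0).toNat := by omega
  rw [hm]
  apply List.map_congr_left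
  intro k _
  simp [Function.comp]
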